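-- pv_equiv track=rewrite | github.com/adrianmartinez-cg/vjudge | lista2/enduringexodus.py | closestToCenter
-- ===== SOURCE A (Python) =====
-- def closestToCenter(A,l,r,c,mid):
--     if l > r:
--         return c
--     m = (l + r) // 2
--     elem = A[m]
--     if abs(elem-mid) < abs(c-mid):
--         closest = elem
--     else:
--         closest = c
--     if elem < mid:
--         return closestToCenter(A,m+1,r,closest,mid)
--     elif elem > mid:
--         return closestToCenter(A,l,m-1,closest,mid)
--     else:
--         return elem
-- ===== SOURCE B (Python) =====
-- def closestToCenter(A, l, r, c, mid):
--     # Collect the probed elements once, then take the stable min by distance to mid.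
--     path = []
--     while l <= r:
--         m = (l + r) // 2
--         elem = A[m]
--         path.append(elem)
--         if elem < mid:
--             l = m + 1
--         elif elem > mid:
--             r = m - 1
--         else:
--             break
--     return min([c] + path, key=lambda x: abs(x - mid))
-- ===== Notes on version B (the rewrite author's own statement) =====
-- stated objective: alternative
-- what changed: The tail recursion threading the running closest through the c parameter is replaced by an iterative loop that collects the probed elements into a list and then takes the stable min by distance to mid with a single library min call.
-- outside the precondition, e.g. on closestToCenter([-1, -4, 6, 9], 0, 7, -4, -5): A returns -4, B returns -4
import Mathlib
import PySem

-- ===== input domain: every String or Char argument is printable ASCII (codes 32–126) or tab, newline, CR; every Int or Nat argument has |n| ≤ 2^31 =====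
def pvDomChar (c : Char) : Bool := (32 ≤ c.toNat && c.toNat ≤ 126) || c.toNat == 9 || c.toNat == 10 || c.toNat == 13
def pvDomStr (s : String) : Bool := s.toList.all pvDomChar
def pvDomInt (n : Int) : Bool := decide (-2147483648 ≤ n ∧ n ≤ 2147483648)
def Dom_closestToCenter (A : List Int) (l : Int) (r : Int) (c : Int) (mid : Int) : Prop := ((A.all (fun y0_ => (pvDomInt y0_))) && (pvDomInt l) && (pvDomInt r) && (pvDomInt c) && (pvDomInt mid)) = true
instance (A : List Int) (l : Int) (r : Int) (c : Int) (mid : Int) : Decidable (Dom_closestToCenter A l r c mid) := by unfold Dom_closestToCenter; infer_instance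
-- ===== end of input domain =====

-- B replaces the tail recursion threading `closest` through parameter c by a loop that
-- collects the probed elements and then takes the stable min by distance to mid (objective: alternative).
-- ===== PORT A =====
def closestToCenter (A : List Int) (l : Int) (r : Int) (c : Int) (mid : Int) : Int :=
  if l > r then c
  else
    let m := PySem.Int.floordiv (l + r) 2
    match PySem.List.pyGet? A m with
    | none => c   -- Python raises IndexError here; Pre_ excludes these inputs
    | some elem =>
      let closest := if |elem - mid| < |c - mid| then elem else c
      if elem < mid then closestToCenter A (m + 1) r closest mid
      else if elem > mid then closestToCenter A l (m - 1) closest mid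
      else elem
termination_by (r - l + 1).toNat
decreasing_by
  all_goals
    have hb := PySem.Int.floordiv_two_mid_bounds (show l ≤ r by omega)
    omega

-- ===== PORT B =====
-- the probed elements, in probe order (stops after an exact hit)
def pvPath (A : List Int) (l : Int) (r : Int) (mid : Int) : List Int :=
  if l > r then []
  else
    let m := PySem.Int.floordiv (l + r) 2
    match PySem.List.pyGet? A m with
    | none => []   -- Python raises IndexError here; Pre_ excludes these inputs
    | some elem =>
      if elem < mid then elem :: pvPath A (m + 1) r mid
      else if elem > mid then elem :: pvPath A l (m - 1) mid
      else [elem]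
termination_by (r - l + 1).toNat
decreasing_by
  all_goals
    have hb := PySem.Int.floordiv_two_mid_bounds (show l ≤ r by omega)
    omega

def closestToCenter_alt (A : List Int) (l : Int) (r : Int) (c : Int) (mid : Int) : Int :=
  match PySem.List.min? (c :: pvPath A l r mid) (fun x => |x - mid|) with
  | some v => v
  | none => c   -- unreachable: the candidate list is nonempty

-- ===== PRECONDITION & SPEC =====
-- Pre_ admits the empty range and in-bounds index ranges; outside it A usually raises IndexError,
-- though for some data the probe path happens to stay in range and A returns (B returns the same value there).
def Pre_closestToCenter (A : List Int) (l : Int) (r : Int) (c : Int) (mid : Int) : Prop :=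
  l > r ∨ (-(A.length : Int) ≤ l ∧ r < (A.length : Int))
instance (A : List Int) (l : Int) (r : Int) (c : Int) (mid : Int) : Decidable (Pre_closestToCenter A l r c mid) := by unfold Pre_closestToCenter; infer_instance
def pvWitness_closestToCenter : List Int × Int × Int × Int × Int := ([1, 3, 5], 0, 2, 0, 4)

def Spec_closestToCenter (A : List Int) (l : Int) (r : Int) (c : Int) (mid : Int) (out : Int) : Prop := out = closestToCenter_alt A l r c mid
instance (A : List Int) (l : Int) (r : Int) (c : Int) (mid : Int) (out : Int) : Decidable (Spec_closestToCenter A l r c mid out) := by unfold Spec_closestToCenter; infer_instance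

-- ===== CLAIM (what is proved, stated in full; the proofs are below) =====
def Claim_equal_closestToCenter : Prop := ∀ (A : List Int) (l : Int) (r : Int) (c : Int) (mid : Int), Dom_closestToCenter A l r c mid → Pre_closestToCenter A l r c mid → Spec_closestToCenter A l r c mid (closestToCenter A l r c mid)

-- ===== LEMMAS AND PROOFS =====

-- Python's min with a key is the strict-< fold; on a nonempty list it folds the tail onto the head.
lemma min?_cons_eq {key : Int → Int} (c : Int) (t : List Int) :
    PySem.List.min? (c :: t) key =
      some (t.foldl (fun m x => if key x < key m then x else m) c) := by
  show List.foldl _ (some c) t = _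
  induction t generalizing c with
  | nil => rfl
  | cons x t ih =>
      simp only [List.foldl_cons]
      split <;> exact ih _

-- A's recursion equals the strict-< fold of the probe path onto the initial candidate c.
lemma closestToCenter_eq_fold (A : List Int) (l r c mid : Int) :
    closestToCenter A l r c mid =
      (pvPath A l r mid).foldl (fun m x => if |x - mid| < |m - mid| then x else m) c := by
  induction l, r, c using closestToCenter.induct A mid with
  | case1 l r c h => rw [closestToCenter, pvPath]; simp [h]
  | case2 l r c h m hget =>
      rw [closestToCenter, pvPath]; simp only [if_neg h]; rw [hget]
      rfl
  | case3 l r c h m elem hget closest hlt ih =>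
      rw [closestToCenter, pvPath]; simp only [if_neg h]; rw [hget]
      simp only [hlt, if_pos, List.foldl_cons]
      exact ih
  | case4 l r c h m elem hget closest hlt hgt ih =>
      rw [closestToCenter, pvPath]; simp only [if_neg h]; rw [hget]
      simp only [if_neg hlt, hgt, if_pos, List.foldl_cons]
      exact ih
  | case5 l r c h m elem hget hlt hgt =>
      rw [closestToCenter, pvPath]; simp only [if_neg h]; rw [hget]
      simp only [if_neg hlt, if_neg hgt, List.foldl_cons, List.foldl_nil]
      have helem : elem = mid := by omega
      split
      · rfl
      · rename_i hc
        have h0 : |elem - mid| = 0 := by simp [helem]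
        have hcz : |c - mid| = 0 := by
          have := abs_nonneg (c - mid)
          omega
        have : c = mid := by have := abs_eq_zero.mp hcz; omega
        omega

-- ===== VERDICT (by name: the statement is the Claim_ definition above) =====
theorem closestToCenter_spec : Claim_equal_closestToCenter := by
  intro A l r c mid _ _
  unfold Spec_closestToCenter closestToCenter_alt
  rw [min?_cons_eq, closestToCenter_eq_fold]
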